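-- pv_equiv track=rewrite | github.com/tomwolfe/LawSage | api/utils/court_formatter.py | format_to_pleading
-- ===== SOURCE A (Python) =====
-- def format_to_pleading(text: str) -> str:
--     """
--     Formats the given text into a 28-line numbered pleading format
--     standard for U.S. District Courts.
--     """
--     # Split the text into lines
--     lines = text.splitlines()
--
--     formatted_lines = []
--     line_counter = 1
--
--     # Standard pleading header/footer could be added here
--     # For now, we'll just wrap the content with line numbers
--
--     for line in lines:
--         if not line.strip() and line_counter > 28:
--             # Optionally reset counter every page, but for simple text export
--             # we'll just keep it going or wrap at 28
--             pass
--
--         # If line is too long, we should ideally wrap it,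
--         # but for this utility we'll assume basic wrapping
--
--         # Format: "1 | [Line text]"
--         # "2 | ..."
--
--         num_str = f"{line_counter:2} | "
--         formatted_lines.append(num_str + line)
--
--         line_counter += 1
--         if line_counter > 28:
--             line_counter = 1
--             formatted_lines.append("-" * 40) # Page break indicator
--
--     return "\n".join(formatted_lines)
-- ===== SOURCE B (Python) =====
-- def format_to_pleading(text: str) -> str:
--     lines = text.splitlines()
--     pages = [lines[i:i + 28] for i in range(0, len(lines), 28)]
--     out = []
--     for page in pages:
--         for n, line in enumerate(page, 1):
--             out.append(f"{n:2} | " + line)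
--         if len(page) == 28:
--             out.append("-" * 40)
--     return "\n".join(out)
-- ===== Notes on version B (the rewrite author's own statement) =====
-- stated objective: alternative
-- what changed: Replaces A's single pass with a mutable wrap-around line counter by a page-based decomposition: split the lines into 28-line pages, number each page locally with enumerate, and emit a separator exactly after full pages.
import Mathlib
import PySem

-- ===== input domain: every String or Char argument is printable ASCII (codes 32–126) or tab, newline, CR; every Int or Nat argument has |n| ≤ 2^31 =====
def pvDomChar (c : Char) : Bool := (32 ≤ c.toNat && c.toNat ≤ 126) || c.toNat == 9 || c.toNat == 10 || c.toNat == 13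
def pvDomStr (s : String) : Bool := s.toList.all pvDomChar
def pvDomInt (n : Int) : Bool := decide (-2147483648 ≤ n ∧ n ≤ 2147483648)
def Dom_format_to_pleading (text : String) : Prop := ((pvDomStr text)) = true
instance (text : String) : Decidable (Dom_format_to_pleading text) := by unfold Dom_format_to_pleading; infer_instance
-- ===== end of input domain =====

-- B numbers 28-line pages locally instead of A's wrap-around mutable counter; alternative decomposition, same cost.

-- f"{n:2}" for the line numbers both Pythons format (always 1..28)
def pvPad2 (n : Int) : String := if n < 10 then " " ++ PySem.Int.toStr n else PySem.Int.toStr n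

def pvSep : String := String.ofList (List.replicate 40 '-')

-- ===== PORT A =====
-- the loop over `lines` with state (formatted_lines, line_counter); the
-- `if not line.strip() and line_counter > 28: pass` branch does nothing and is omitted
def pvLoopA : List String → List String → Int → List String
  | [], acc, _ => acc
  | line :: rest, acc, c =>
    let acc := acc ++ [pvPad2 c ++ " | " ++ line]
    let c := c + 1
    if c > 28 then pvLoopA rest (acc ++ [pvSep]) 1 else pvLoopA rest acc c

def format_to_pleading (text : String) : String :=
  PySem.Str.join "\n" (pvLoopA (PySem.Str.splitlines text) [] 1)

-- ===== PORT B =====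
-- pages = [lines[i:i+28] for i in range(0, len(lines), 28)]
def pvPages (ls : List String) : List (List String) :=
  if h : ls = [] then [] else ls.take 28 :: pvPages (ls.drop 28)
termination_by ls.length
decreasing_by
  have : 0 < ls.length := List.length_pos_iff.mpr h
  simp [List.length_drop]; omega

-- inner loop: [f"{n:2} | " + line for n, line in enumerate(page, 1)]
def pvNumPage (page : List String) : List String :=
  (PySem.List.enumerate page 1).map (fun p => pvPad2 p.1 ++ " | " ++ p.2)

def format_to_pleading_alt (text : String) : String :=
  PySem.Str.join "\n"
    ((pvPages (PySem.Str.splitlines text)).foldl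
      (fun out page => out ++ pvNumPage page ++ (if page.length == 28 then [pvSep] else [])) [])

-- ===== PRECONDITION & SPEC =====
def Spec_format_to_pleading (text : String) (out : String) : Prop := out = format_to_pleading_alt text
instance (text : String) (out : String) : Decidable (Spec_format_to_pleading text out) := by unfold Spec_format_to_pleading; infer_instance

-- ===== CLAIM (what is proved, stated in full; the proofs are below) =====
def Claim_equal_format_to_pleading : Prop := ∀ (text : String), Dom_format_to_pleading text → Spec_format_to_pleading text (format_to_pleading text)

-- ===== LEMMAS AND PROOFS =====

-- numbering a page starting at counter s
def pvNumFrom : Int → List String → List String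
  | _, [] => []
  | c, line :: rest => (pvPad2 c ++ " | " ++ line) :: pvNumFrom (c + 1) rest

lemma pvNumPage_eq (page : List String) :
    ∀ s : Int, (PySem.List.enumerate page s).map (fun p => pvPad2 p.1 ++ " | " ++ p.2) = pvNumFrom s page := by
  induction page with
  | nil => intro s; simp [pvNumFrom, PySem.List.enumerate]
  | cons l r ih =>
    intro s
    simp only [PySem.List.enumerate, List.map_cons, pvNumFrom, ih (s + 1)]

-- A's loop processes one page of (up to) k remaining slots, counter 29 - k
lemma pvLoopA_chunk : ∀ (k : Nat), 0 < k → k ≤ 28 → ∀ (ls acc : List String),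
    pvLoopA ls acc (29 - (k : Int)) =
      if k ≤ ls.length then
        pvLoopA (ls.drop k) (acc ++ pvNumFrom (29 - (k : Int)) (ls.take k) ++ [pvSep]) 1
      else acc ++ pvNumFrom (29 - (k : Int)) ls := by
  intro k hk hk28
  induction k with
  | zero => omega
  | succ k ih =>
    intro ls acc
    cases ls with
    | nil =>
      simp [pvLoopA, pvNumFrom]
    | cons l rest =>
      show pvLoopA (l :: rest) acc _ = _
      rw [pvLoopA]
      push_cast
      rcases Nat.eq_zero_or_pos k with hk0 | hkpos
      · subst hk0
        norm_num [pvNumFrom]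
      · rw [if_neg (by omega : ¬ ((29 : Int) - ((k : Int) + 1) + 1 > 28))]
        have harith : (29 : Int) - ((k : Int) + 1) + 1 = 29 - (k : Int) := by ring
        rw [harith, ih hkpos (by omega) rest]
        by_cases hlen : k + 1 ≤ (l :: rest).length
        · have hlen' : k ≤ rest.length := by simp at hlen ⊢; omega
          rw [if_pos hlen', if_pos hlen]
          simp [pvNumFrom, harith]
        · have hlen' : ¬ k ≤ rest.length := by simp at hlen ⊢; omega
          rw [if_neg hlen', if_neg hlen]
          simp [pvNumFrom, harith]

def pvG (page : List String) : List String :=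
  pvNumFrom 1 page ++ (if page.length == 28 then [pvSep] else [])

lemma pvLoopA_pages : ∀ (n : Nat) (ls acc : List String), ls.length ≤ n →
    pvLoopA ls acc 1 = acc ++ (pvPages ls).flatMap pvG := by
  intro n
  induction n with
  | zero =>
    intro ls acc h
    have : ls = [] := List.eq_nil_of_length_eq_zero (by omega)
    subst this
    rw [pvPages.eq_def]
    simp [pvLoopA]
  | succ n ih =>
    intro ls acc h
    rcases eq_or_ne ls [] with rfl | hne
    · rw [pvPages.eq_def]
      simp [pvLoopA]
    · rw [pvPages.eq_def, dif_neg hne]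
      have h28 := pvLoopA_chunk 28 (by omega) (by omega) ls acc
      norm_num at h28
      rw [h28]
      by_cases hlen : 28 ≤ ls.length
      · rw [if_pos hlen]
        rw [ih (ls.drop 28) _ (by simp [List.length_drop]; omega)]
        have htake : (ls.take 28).length = 28 := by simp; omega
        simp [pvG, htake]
      · rw [if_neg hlen]
        have hdrop : ls.drop 28 = [] := List.drop_eq_nil_of_le (by omega)
        have htake : ls.take 28 = ls := List.take_of_length_le (by omega)
        have hne28 : ls.length ≠ 28 := by omega
        rw [hdrop, htake, pvPages.eq_def]
        simp [pvG, hne28]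

lemma pvFoldB (cs : List (List String)) :
    cs.foldl (fun out page => out ++ pvNumPage page ++ (if page.length == 28 then [pvSep] else [])) []
      = cs.flatMap pvG := by
  have key : ∀ (cs : List (List String)) (acc : List String),
      cs.foldl (fun out page => out ++ pvNumPage page ++ (if page.length == 28 then [pvSep] else [])) acc
        = acc ++ cs.flatMap pvG := by
    intro cs
    induction cs with
    | nil => intro acc; simp
    | cons p r ih =>
      intro acc
      have hnp : pvNumPage p = pvNumFrom 1 p := by
        simpa using pvNumPage_eq p 1
      rw [List.foldl_cons, ih]
      simp [List.flatMap_cons, pvG, hnp, List.append_assoc]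
  simpa using key cs []

-- ===== VERDICT (by name: the statement is the Claim_ definition above) =====
theorem format_to_pleading_spec : Claim_equal_format_to_pleading := by
  intro text _
  unfold Spec_format_to_pleading format_to_pleading format_to_pleading_alt
  rw [pvFoldB, pvLoopA_pages (PySem.Str.splitlines text).length _ _ le_rfl]
  simp
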